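-- pv_equiv track=rewrite | github.com/mcwladkoe/TPR-3 | tpr_3/views.py | abs_resh
-- ===== SOURCE A (Python) =====
-- def abs_resh(mas, ne):
--     indexes = []
--     for i in range(len(mas[0])):
--         is_ = True
--         for j in range(len(mas)):
--             if mas[j][i] < ne[j]:
--                 is_ = False
--         if is_:
--             indexes.append(str(i + 1))
--     return indexes
-- ===== SOURCE B (Python) =====
-- def abs_resh(mas, ne):
--     valid = [True] * len(mas[0])
--     for row, t in zip(mas, ne):
--         valid = [v and row[i] >= t for i, v in enumerate(valid)]
--     return [str(i + 1) for i, v in enumerate(valid) if v]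
-- ===== Notes on version B (the rewrite author's own statement) =====
-- stated objective: alternative
-- what changed: Replaces A's column-major double loop (fresh per-column flag, inner scan over rows) by a row-major single pass over zip(mas, ne) maintaining an incrementally-updated boolean column mask, then emits the surviving column numbers.
import Mathlib
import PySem

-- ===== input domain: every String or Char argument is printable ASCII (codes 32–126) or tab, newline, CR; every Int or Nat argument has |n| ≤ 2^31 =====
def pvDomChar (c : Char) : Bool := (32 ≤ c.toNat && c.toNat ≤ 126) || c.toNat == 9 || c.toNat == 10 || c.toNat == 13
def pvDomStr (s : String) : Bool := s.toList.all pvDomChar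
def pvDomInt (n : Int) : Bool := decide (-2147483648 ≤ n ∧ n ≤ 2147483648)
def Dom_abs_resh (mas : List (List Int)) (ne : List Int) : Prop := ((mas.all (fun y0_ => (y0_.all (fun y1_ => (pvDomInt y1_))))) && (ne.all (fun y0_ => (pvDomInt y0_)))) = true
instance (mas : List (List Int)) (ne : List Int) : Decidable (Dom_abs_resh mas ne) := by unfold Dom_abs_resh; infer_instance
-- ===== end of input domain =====

-- B keeps a row-major column mask instead of A's column-major rescans; return value only (neither mutates).

-- ===== PORT A =====
def abs_resh (mas : List (List Int)) (ne : List Int) : List String :=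
  (PySem.List.pyRange 0 (((PySem.List.pyGetD mas 0 []).length : Int)) 1).foldl
    (fun indexes i =>
      let is_ := (PySem.List.pyRange 0 ((mas.length : Int)) 1).foldl
        (fun is_ j =>
          if PySem.List.pyGetD (PySem.List.pyGetD mas j []) i 0 < PySem.List.pyGetD ne j 0 then false
          else is_)
        true
      if is_ then indexes ++ [PySem.Int.toStr (i + 1)] else indexes)
    []

-- ===== PORT B =====
def abs_resh_alt (mas : List (List Int)) (ne : List Int) : List String :=
  let valid0 : List Bool := PySem.List.pyRepeat [true] (((PySem.List.pyGetD mas 0 []).length : Int))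
  let valid := (mas.zip ne).foldl
    (fun valid rt =>
      (PySem.List.enumerate valid 0).map
        (fun iv => iv.2 && decide (rt.2 ≤ PySem.List.pyGetD rt.1 iv.1 0)))
    valid0
  (PySem.List.enumerate valid 0).foldl
    (fun acc iv => if iv.2 then acc ++ [PySem.Int.toStr (iv.1 + 1)] else acc) []

-- ===== PRECONDITION & SPEC =====
-- Pre_ excludes exactly the inputs where Python A raises IndexError: empty mas, a row shorter
-- than row 0 (when row 0 is nonempty), or ne shorter than mas (when row 0 is nonempty).
def Pre_abs_resh (mas : List (List Int)) (ne : List Int) : Prop :=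
  mas ≠ [] ∧
    ((mas.headD []).length = 0 ∨
      ((∀ row ∈ mas, (mas.headD []).length ≤ row.length) ∧ mas.length ≤ ne.length))
instance (mas : List (List Int)) (ne : List Int) : Decidable (Pre_abs_resh mas ne) := by
  unfold Pre_abs_resh; infer_instance

def pvWitness_abs_resh : List (List Int) × List Int := ([[1, 2], [3, 4]], [1, 3])

def Spec_abs_resh (mas : List (List Int)) (ne : List Int) (out : List String) : Prop :=
  out = abs_resh_alt mas ne
instance (mas : List (List Int)) (ne : List Int) (out : List String) :
    Decidable (Spec_abs_resh mas ne out) := by unfold Spec_abs_resh; infer_instance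

-- ===== CLAIM (what is proved, stated in full; the proofs are below) =====
def Claim_equal_abs_resh : Prop :=
  ∀ (mas : List (List Int)) (ne : List Int),
    Dom_abs_resh mas ne → Pre_abs_resh mas ne → Spec_abs_resh mas ne (abs_resh mas ne)

-- ===== LEMMAS AND PROOFS =====

-- enumerate of a range-indexed list is the range paired with the entries
theorem pv_enum_map_range {α : Type} [Inhabited α] (n : Nat) (g : Int → α) :
    PySem.List.enumerate ((PySem.List.pyRange 0 (n : Int) 1).map g) 0
      = (PySem.List.pyRange 0 (n : Int) 1).map (fun i => (i, g i)) := by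
  have hlen : PySem.List.len ((PySem.List.pyRange 0 (n : Int) 1).map g) = (n : Int) := by
    simp [PySem.List.length_pyRange_one]
  rw [PySem.List.enumerate_eq_map_pyRange _ default, hlen]
  refine List.map_congr_left ?_
  intro i hi
  rcases (PySem.List.mem_pyRange_one).1 hi with ⟨h0, hn⟩
  simp [PySem.List.pyGetD_map_pyRange_of_nonneg g (n : Int) i default h0 hn]

-- one mask-update step on a range-indexed mask
theorem pv_mask_step (n : Nat) (g : Int → Bool) (q : Int → Bool) :
    (PySem.List.enumerate ((PySem.List.pyRange 0 (n : Int) 1).map g) 0).map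
        (fun iv => iv.2 && q iv.1)
      = (PySem.List.pyRange 0 (n : Int) 1).map (fun i => g i && q i) := by
  rw [pv_enum_map_range, List.map_map]
  simp [Function.comp]

-- the whole row loop of B: the mask records, per column, the conjunction over all rows
theorem pv_mask_fold (n : Nat) (ps : List (List Int × Int)) (g : Int → Bool) :
    ps.foldl
        (fun valid rt =>
          (PySem.List.enumerate valid 0).map
            (fun iv => iv.2 && decide (rt.2 ≤ PySem.List.pyGetD rt.1 iv.1 0)))
        ((PySem.List.pyRange 0 (n : Int) 1).map g)
      = (PySem.List.pyRange 0 (n : Int) 1).map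
          (fun i => g i && ps.all (fun rt => decide (rt.2 ≤ PySem.List.pyGetD rt.1 i 0))) := by
  induction ps generalizing g with
  | nil => simp
  | cons rt ps ih =>
    rw [List.foldl_cons,
      pv_mask_step n g (fun i => decide (rt.2 ≤ PySem.List.pyGetD rt.1 i 0)), ih]
    refine List.map_congr_left ?_
    intro i _
    simp [Bool.and_assoc]

-- B's row loop starting from an empty mask stays empty
theorem pv_mask_fold_nil (ps : List (List Int × Int)) :
    ps.foldl
        (fun valid rt =>
          (PySem.List.enumerate valid 0).map
            (fun iv => iv.2 && decide (rt.2 ≤ PySem.List.pyGetD rt.1 iv.1 0)))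
        [] = ([] : List Bool) := by
  induction ps with
  | nil => rfl
  | cons rt ps ih => simpa [PySem.List.enumerate_nil] using ih

-- A's flag loop: starts true, flipped to false iff some element fails
theorem pv_foldl_if_false {α : Type} (l : List α) (p : α → Prop) [DecidablePred p] (b : Bool) :
    l.foldl (fun b x => if p x then false else b) b = (b && l.all (fun x => !decide (p x))) := by
  induction l generalizing b with
  | nil => simp
  | cons x l ih =>
    rw [List.foldl_cons, ih]
    by_cases h : p x <;> simp [h]

-- A's inner fold over row indices equals B's all over zip, given ne is long enough
theorem pv_inner_eq (mas : List (List Int)) (ne : List Int) (hne : mas.length ≤ ne.length)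
    (i : Int) :
    (PySem.List.pyRange 0 ((mas.length : Int)) 1).foldl
        (fun is_ j =>
          if PySem.List.pyGetD (PySem.List.pyGetD mas j []) i 0 < PySem.List.pyGetD ne j 0 then false
          else is_)
        true
      = (mas.zip ne).all (fun rt => decide (rt.2 ≤ PySem.List.pyGetD rt.1 i 0)) := by
  rw [pv_foldl_if_false]
  simp only [Bool.true_and]
  rw [Bool.eq_iff_iff]
  simp only [List.all_eq_true]
  constructor
  · intro h rt hrt
    rcases List.mem_iff_getElem.1 hrt with ⟨k, hk, hrtk⟩
    have hkm : k < mas.length := by simp [List.length_zip] at hk; omega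
    have hkn : k < ne.length := by omega
    have hj := h ((k : Nat) : Int)
      ((PySem.List.mem_pyRange_one).2 ⟨by exact_mod_cast Nat.zero_le k, by exact_mod_cast hkm⟩)
    subst hrtk
    simp only [List.getElem_zip]
    rw [PySem.List.pyGetD_eq_getElem mas [] (by exact_mod_cast Nat.zero_le k) (by exact_mod_cast hkm),
      PySem.List.pyGetD_eq_getElem ne 0 (by exact_mod_cast Nat.zero_le k) (by exact_mod_cast hkn)] at hj
    simp only [Int.toNat_natCast] at hj
    simpa [not_lt] using hj
  · intro h j hj
    rcases (PySem.List.mem_pyRange_one).1 hj with ⟨h0, hm⟩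
    have hjm : j.toNat < mas.length := by omega
    have hjn : j.toNat < ne.length := by omega
    have hmem : (mas[j.toNat], ne[j.toNat]) ∈ mas.zip ne := by
      refine List.mem_iff_getElem.2 ⟨j.toNat, by simp [List.length_zip]; omega, ?_⟩
      simp [List.getElem_zip]
    have hq := h _ hmem
    rw [PySem.List.pyGetD_eq_getElem mas [] h0 hm,
      PySem.List.pyGetD_eq_getElem ne 0 h0 (by omega)]
    simpa [not_lt] using hq

-- ===== VERDICT (by name: the statement is the Claim_ definition above) =====
theorem abs_resh_spec : Claim_equal_abs_resh := by
  intro mas ne _ hpre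
  unfold Spec_abs_resh abs_resh abs_resh_alt
  simp only []
  obtain ⟨hnil, hcase⟩ := hpre
  set n : Nat := (PySem.List.pyGetD mas 0 []).length with hn
  have hrep : PySem.List.pyRepeat [true] ((n : Int))
      = (PySem.List.pyRange 0 (n : Int) 1).map (fun _ => true) := by
    rw [PySem.List.pyRepeat_singleton, List.map_const']
    simp [PySem.List.length_pyRange_one]
  rcases hcase with h0 | ⟨_, hne⟩
  · -- row 0 empty: both sides are []
    have hn0 : n = 0 := by
      cases mas with
      | nil => exact absurd rfl hnil
      | cons r rs => simpa [hn, PySem.List.pyGetD_zero_cons] using h0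
    rw [hrep, hn0]
    simp [pv_mask_fold_nil, PySem.List.pyRange_zero_nat, PySem.List.enumerate_nil]
  · -- general case: reduce both sides to filter-then-map over the column range
    rw [hrep, pv_mask_fold, pv_enum_map_range,
      PySem.List.foldl_append_if (fun iv : Int × Bool => iv.2)
        (fun iv : Int × Bool => PySem.Int.toStr (iv.1 + 1)),
      PySem.List.foldl_append_if
        (fun i => (PySem.List.pyRange 0 ((mas.length : Int)) 1).foldl
          (fun is_ j =>
            if PySem.List.pyGetD (PySem.List.pyGetD mas j []) i 0 < PySem.List.pyGetD ne j 0 then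
              false
            else is_) true)
        (fun i => PySem.Int.toStr (i + 1))]
    simp only [List.nil_append, List.filter_map, List.map_map, Function.comp_def]
    congr 1
    refine List.filter_congr ?_
    intro i _
    simp only [Bool.true_and]
    exact pv_inner_eq mas ne hne i
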